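-- pv_equiv track=rewrite | github.com/MrBrantCode/unitest_baseline | mut_generate/mist_train_cf/cf_87890/solution.py | find_first_non_repeating_vowel
-- ===== SOURCE A (Python) =====
-- def find_first_non_repeating_vowel(string):
--     vowels = "aeiou"
--     vowel_count = [0] * 5
--
--     for char in string:
--         if char in vowels:
--             vowel_count[vowels.index(char)] += 1
--
--     for char in string:
--         if char in vowels and vowel_count[vowels.index(char)] == 1:
--             return char
--
--     return "No non-repeating vowel found"
-- ===== SOURCE B (Python) =====
-- def find_first_non_repeating_vowel(string):
--     counts = {}  # vowel -> occurrence count, keys in first-occurrence order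
--     for ch in string:
--         if ch in "aeiou":
--             counts[ch] = counts.get(ch, 0) + 1
--     for v, c in counts.items():  # dict order = first-occurrence order
--         if c == 1:
--             return v
--     return "No non-repeating vowel found"
-- ===== Notes on version B (the rewrite author's own statement) =====
-- stated objective: faster
-- what changed: One pass builds a dict of vowel counts keyed in first-occurrence order, and the answer is read off by scanning the at-most-5 dict entries, replacing A's second full string scan and its per-character vowels.index calls.
import Mathlib
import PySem

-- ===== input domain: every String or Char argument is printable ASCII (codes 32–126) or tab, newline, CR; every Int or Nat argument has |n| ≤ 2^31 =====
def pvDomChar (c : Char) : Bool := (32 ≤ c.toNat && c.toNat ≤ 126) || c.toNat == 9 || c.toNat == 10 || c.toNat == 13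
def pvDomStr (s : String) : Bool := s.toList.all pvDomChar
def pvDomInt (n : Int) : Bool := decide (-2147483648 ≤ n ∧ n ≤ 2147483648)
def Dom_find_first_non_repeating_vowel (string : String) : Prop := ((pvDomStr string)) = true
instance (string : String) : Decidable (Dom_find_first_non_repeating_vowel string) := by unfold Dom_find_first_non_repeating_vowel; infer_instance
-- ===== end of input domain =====

-- B replaces A's second full string scan (with per-character vowels.index calls) by a single
-- counting pass into a dict keyed in first-occurrence order plus a scan of its ≤5 entries (faster, constant factor).

-- ===== PORT A =====
-- 'char in vowels' and 'vowels.index(char)' are ported over the character list; the index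
-- lookup is only evaluated under the membership guard, where index? is some, so getD 0 is exact.
def find_first_non_repeating_vowel (string : String) : String :=
  let vowels : List Char := "aeiou".toList
  let vowel_count : List Int :=
    string.toList.foldl
      (fun vc char =>
        if char ∈ vowels then
          let i := (PySem.List.index? vowels char).getD 0
          vc.set i (vc.getD i 0 + 1)
        else vc)
      (List.replicate 5 (0 : Int))
  match string.toList.find?
      (fun char => decide (char ∈ vowels) &&
        (vowel_count.getD ((PySem.List.index? vowels char).getD 0) 0 == 1)) with
  | some c => String.ofList [c]
  | none => "No non-repeating vowel found"

-- ===== PORT B =====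
def find_first_non_repeating_vowel_alt (string : String) : String :=
  let counts : PySem.Dict Char Int :=
    string.toList.foldl
      (fun d ch => if ch ∈ "aeiou".toList then d.insert ch (d.getD ch 0 + 1) else d)
      PySem.Dict.empty
  match counts.items.find? (fun p => p.2 == 1) with
  | some p => String.ofList [p.1]
  | none => "No non-repeating vowel found"

-- ===== PRECONDITION & SPEC =====
def Spec_find_first_non_repeating_vowel (string : String) (out : String) : Prop := out = find_first_non_repeating_vowel_alt string
instance (string : String) (out : String) : Decidable (Spec_find_first_non_repeating_vowel string out) := by unfold Spec_find_first_non_repeating_vowel; infer_instance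

-- ===== CLAIM (what is proved, stated in full; the proofs are below) =====
def Claim_equal_find_first_non_repeating_vowel : Prop := ∀ (string : String), Dom_find_first_non_repeating_vowel string → Spec_find_first_non_repeating_vowel string (find_first_non_repeating_vowel string)

-- ===== LEMMAS AND PROOFS =====

-- A's counting loop on the 5-slot array, fully characterised.
theorem pvCountsA (l : List Char) (a e i o u : Int) :
    l.foldl
      (fun vc char =>
        if char ∈ "aeiou".toList then
          let i := (PySem.List.index? "aeiou".toList char).getD 0
          vc.set i (vc.getD i 0 + 1)
        else vc)
      [a, e, i, o, u]
    = [a + l.count 'a', e + l.count 'e', i + l.count 'i', o + l.count 'o', u + l.count 'u'] := by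
  induction l generalizing a e i o u with
  | nil => simp
  | cons c t ih =>
    by_cases hc : c ∈ "aeiou".toList
    · have hc' := hc
      simp only [show "aeiou".toList = ['a','e','i','o','u'] from rfl, List.mem_cons,
        List.not_mem_nil, or_false] at hc'
      rcases hc' with rfl | rfl | rfl | rfl | rfl
      · show List.foldl _ [a + 1, e, i, o, u] t = _
        rw [ih]; simp; omega
      · show List.foldl _ [a, e + 1, i, o, u] t = _
        rw [ih]; simp; omega
      · show List.foldl _ [a, e, i + 1, o, u] t = _
        rw [ih]; simp; omega
      · show List.foldl _ [a, e, i, o + 1, u] t = _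
        rw [ih]; simp; omega
      · show List.foldl _ [a, e, i, o, u + 1] t = _
        rw [ih]; simp; omega
    · have hne : ∀ v : Char, v ∈ "aeiou".toList → (c == v) = false := by
        intro v hv
        simp only [beq_eq_false_iff_ne]
        rintro rfl; exact hc hv
      simp only [List.foldl_cons, if_neg hc]
      rw [ih]
      have h1 := hne 'a' (by decide); have h2 := hne 'e' (by decide)
      have h3 := hne 'i' (by decide); have h4 := hne 'o' (by decide)
      have h5 := hne 'u' (by decide)
      simp [List.count_cons, h1, h2, h3, h4, h5]

-- Nat-cast Bool equality used to align A's Int counter test with the Nat count.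
theorem pvBeqCast (n : Nat) : decide (n = 1) = ((n : Int) == 1) := by
  by_cases h : n = 1 <;> simp [h]

-- find? only looks at the members of the list.
theorem pvFindCongrMem {α : Type} (p q : α → Bool) :
    ∀ (l : List α), (∀ x ∈ l, p x = q x) → l.find? p = l.find? q := by
  intro l
  induction l with
  | nil => intro _; rfl
  | cons x t ih =>
    intro h
    simp only [List.find?_cons]
    rw [h x (List.mem_cons_self), ih (fun y hy => h y (List.mem_cons_of_mem _ hy))]

-- removing an element the predicate rejects does not change find?.
theorem pvFindDiscard (q : Char → Bool) (x : Char) (hx : q x = false) (s : List Char) :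
    ((PySem.Set.discard s x).find? q) = s.find? q := by
  have hds : PySem.Set.discard s x = s.filter (fun y => !(y == x)) := by
    simp [PySem.Set.discard]
  rw [hds, List.find?_filter]
  apply pvFindCongrMem
  intro y _
  by_cases hy : y = x
  · subst hy; simp [hx]
  · simp [hy]

-- find? over the first-occurrence dedup equals find? over the list itself.
theorem pvFindOfList (q : Char → Bool) :
    ∀ (xs : List Char), (PySem.Set.ofList xs).find? q = xs.find? q := by
  intro xs
  induction xs with
  | nil => rfl
  | cons x t ih =>
    rw [PySem.Set.ofList_cons]
    simp only [List.find?_cons]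
    cases hqx : q x with
    | true => rfl
    | false => rw [pvFindDiscard q x hqx, ih]

-- B's loop is the counter of the vowel-filtered list.
theorem pvAltEq (l : List Char) :
    l.foldl
      (fun d ch => if ch ∈ "aeiou".toList then d.insert ch (d.getD ch 0 + 1) else d)
      PySem.Dict.empty
    = PySem.Dict.counter (l.filter (fun c => decide (c ∈ "aeiou".toList))) := by
  rw [PySem.List.foldl_ite_eq_foldl_filter (p := fun ch => ch ∈ "aeiou".toList)
        (f := fun d ch => PySem.Dict.insert d ch (d.getD ch 0 + 1)),
      PySem.Dict.foldl_insert_getD_add_one_eq_counter]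

-- ===== VERDICT (by name: the statement is the Claim_ definition above) =====
theorem find_first_non_repeating_vowel_spec : Claim_equal_find_first_non_repeating_vowel := by
  intro string _
  unfold Spec_find_first_non_repeating_vowel
  simp only [find_first_non_repeating_vowel, find_first_non_repeating_vowel_alt]
  rw [pvAltEq, PySem.Dict.items_counter, List.find?_map]
  rw [show List.replicate 5 (0:Int) = [0,0,0,0,0] from rfl, pvCountsA]
  rw [show ((fun (p : Char × Int) => p.2 == 1) ∘
        fun k => (k, (List.count k (string.toList.filter (fun c => decide (c ∈ "aeiou".toList))) : Int)))
      = fun k => ((List.count k (string.toList.filter (fun c => decide (c ∈ "aeiou".toList))) : Int) == 1)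
      from rfl]
  rw [pvFindOfList]
  have hpred :
      (string.toList.filter (fun c => decide (c ∈ "aeiou".toList))).find?
        (fun k => ((List.count k (string.toList.filter (fun c => decide (c ∈ "aeiou".toList))) : Int) == 1))
      = string.toList.find?
        (fun char => decide (char ∈ "aeiou".toList) &&
          (([(0:Int) + string.toList.count 'a', 0 + string.toList.count 'e',
             0 + string.toList.count 'i', 0 + string.toList.count 'o',
             0 + string.toList.count 'u'].getD
              ((PySem.List.index? "aeiou".toList char).getD 0) 0) == 1)) := by
    rw [List.find?_filter]
    apply pvFindCongrMem
    intro c _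
    by_cases hc : c ∈ "aeiou".toList
    · have hcount : List.count c (string.toList.filter (fun c => decide (c ∈ "aeiou".toList)))
          = List.count c string.toList := List.count_filter (by simpa using hc)
      have hc' := hc
      simp only [show "aeiou".toList = ['a','e','i','o','u'] from rfl, List.mem_cons,
        List.not_mem_nil, or_false] at hc'
      rcases hc' with rfl | rfl | rfl | rfl | rfl
      · rw [show (PySem.List.index? "aeiou".toList 'a').getD 0 = 0 from rfl]
        simp [hcount, hc, pvBeqCast]
      · rw [show (PySem.List.index? "aeiou".toList 'e').getD 0 = 1 from rfl]
        simp [hcount, hc, pvBeqCast]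
      · rw [show (PySem.List.index? "aeiou".toList 'i').getD 0 = 2 from rfl]
        simp [hcount, hc, pvBeqCast]
      · rw [show (PySem.List.index? "aeiou".toList 'o').getD 0 = 3 from rfl]
        simp [hcount, hc, pvBeqCast]
      · rw [show (PySem.List.index? "aeiou".toList 'u').getD 0 = 4 from rfl]
        simp [hcount, hc, pvBeqCast]
    · have hc' : ¬(c = 'a' ∨ c = 'e' ∨ c = 'i' ∨ c = 'o' ∨ c = 'u') := by simpa using hc
      push Not at hc'
      obtain ⟨h1, h2, h3, h4, h5⟩ := hc'
      simp [h1, h2, h3, h4, h5]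
  rw [hpred]
  cases string.toList.find?
      (fun char => decide (char ∈ "aeiou".toList) &&
        (([(0:Int) + string.toList.count 'a', 0 + string.toList.count 'e',
           0 + string.toList.count 'i', 0 + string.toList.count 'o',
           0 + string.toList.count 'u'].getD
            ((PySem.List.index? "aeiou".toList char).getD 0) 0) == 1)) with
  | none => rfl
  | some c => rfl
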